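-- pv_equiv track=rewrite | github.com/Excel-001/cryptography-assignment | sboxgenerator.py | affine_transform
-- ===== SOURCE A (Python) =====
-- def affine_transform(byte_val):
--     """
--     Applies the AES Affine Transformation to a byte.
--     """
--     c = 0x63
--     b = byte_val
--     new_b = 0
--
--     for i in range(8):
--         # Calculate the ith bit based on the AES matrix
--         bit = (b >> i) & 1
--         bit ^= (b >> ((i + 4) % 8)) & 1
--         bit ^= (b >> ((i + 5) % 8)) & 1
--         bit ^= (b >> ((i + 6) % 8)) & 1
--         bit ^= (b >> ((i + 7) % 8)) & 1
--
--         # Add the constant bit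
--         c_bit = (c >> i) & 1
--         bit ^= c_bit
--
--         new_b |= (bit << i)
--
--     return new_b
-- ===== SOURCE B (Python) =====
-- def affine_transform(byte_val):
--     """AES affine transformation of a byte, via whole-byte rotate-XORs."""
--     b = byte_val % 256
--
--     def rotr(x, n):
--         return ((x >> n) | (x << (8 - n))) & 0xFF
--
--     return b ^ rotr(b, 4) ^ rotr(b, 5) ^ rotr(b, 6) ^ rotr(b, 7) ^ 0x63
-- ===== Notes on version B (the rewrite author's own statement) =====
-- stated objective: alternative
-- what changed: Replaces A's per-output-bit loop that reconstructs the result bit by bit with a single whole-byte expression: mask the input to its low byte and XOR it with four rotated copies of itself and the AES constant.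
import Mathlib
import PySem

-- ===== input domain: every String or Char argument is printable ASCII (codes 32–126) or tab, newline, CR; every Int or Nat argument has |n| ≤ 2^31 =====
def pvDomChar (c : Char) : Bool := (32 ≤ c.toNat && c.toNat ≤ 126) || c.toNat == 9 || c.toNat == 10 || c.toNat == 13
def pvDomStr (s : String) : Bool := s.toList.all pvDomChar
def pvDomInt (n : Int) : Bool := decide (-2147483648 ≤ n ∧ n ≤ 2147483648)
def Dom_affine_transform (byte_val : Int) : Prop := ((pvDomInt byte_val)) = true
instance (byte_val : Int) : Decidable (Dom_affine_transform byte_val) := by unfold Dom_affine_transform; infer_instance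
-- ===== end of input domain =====

-- B replaces A's per-output-bit loop by one pass of whole-byte XORs of four rotated
-- copies of the masked byte (alternative formulation, same cost at byte size).

-- ===== PORT A =====
-- Python's >> / << are Mathlib's Int >>> / <<< with Int shift count (equal for the
-- nonnegative counts used here); &, |, ^ and % are PySem.Int.band/bor/bxor/mod
-- (Python-exact, also on negatives).
def affine_transform (byte_val : Int) : Int :=
  let c : Int := 0x63
  let b := byte_val
  (PySem.List.pyRange 0 8 1).foldl (fun new_b i =>
    let bit := PySem.Int.band (b >>> i) 1
    let bit := PySem.Int.bxor bit (PySem.Int.band (b >>> (PySem.Int.mod (i+4) 8)) 1)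
    let bit := PySem.Int.bxor bit (PySem.Int.band (b >>> (PySem.Int.mod (i+5) 8)) 1)
    let bit := PySem.Int.bxor bit (PySem.Int.band (b >>> (PySem.Int.mod (i+6) 8)) 1)
    let bit := PySem.Int.bxor bit (PySem.Int.band (b >>> (PySem.Int.mod (i+7) 8)) 1)
    let c_bit := PySem.Int.band (c >>> i) 1
    let bit := PySem.Int.bxor bit c_bit
    PySem.Int.bor new_b (bit <<< i)) 0

-- ===== PORT B =====
-- rotr(x, n): 8-bit rotate right; its shift counts n and 8 - n are again Int shifts
def pvRotr (x : Int) (n : Int) : Int :=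
  PySem.Int.band (PySem.Int.bor (x >>> n) (x <<< (8 - n))) 0xFF

def affine_transform_alt (byte_val : Int) : Int :=
  let b := PySem.Int.mod byte_val 256
  PySem.Int.bxor (PySem.Int.bxor (PySem.Int.bxor (PySem.Int.bxor (PySem.Int.bxor b
    (pvRotr b 4)) (pvRotr b 5)) (pvRotr b 6)) (pvRotr b 7)) 0x63

-- ===== PRECONDITION & SPEC =====
def Spec_affine_transform (byte_val : Int) (out : Int) : Prop := out = affine_transform_alt byte_val
instance (byte_val : Int) (out : Int) : Decidable (Spec_affine_transform byte_val out) := by unfold Spec_affine_transform; infer_instance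

-- ===== CLAIM (what is proved, stated in full; the proofs are below) =====
def Claim_equal_affine_transform : Prop := ∀ (byte_val : Int), Dom_affine_transform byte_val → Spec_affine_transform byte_val (affine_transform byte_val)

-- ===== LEMMAS AND PROOFS =====

lemma pv_fmod256 (x : Int) : Int.fmod x 256 = x % 256 := by
  rw [Int.fmod_eq_emod]; norm_num

-- each bit A reads depends only on the low byte of the input
lemma pv_bandbit (b : Int) (k : Nat) (hk : k < 8) :
    PySem.Int.band (b >>> k) 1 = PySem.Int.band ((b % 256) >>> k) 1 := by
  rw [PySem.Int.band_one, PySem.Int.band_one, Int.shiftRight_eq_div_pow,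
    Int.shiftRight_eq_div_pow]
  simp only [PySem.Int.mod]
  rw [Int.fmod_eq_emod, Int.fmod_eq_emod]
  interval_cases k <;> norm_num <;> omega

-- the same with the shift count an integer, as in the ports
lemma pv_bandbitI (b : Int) (k : Int) (h0 : 0 ≤ k) (h8 : k < 8) :
    PySem.Int.band (b >>> k) 1 = PySem.Int.band ((b % 256) >>> k) 1 := by
  have hk : k = ((k.toNat : Nat) : Int) := by omega
  rw [hk, Int.shiftRight_natCast_right, Int.shiftRight_natCast_right]
  exact pv_bandbit b k.toNat (by omega)

-- A is periodic with period 256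
lemma pv_periA (b : Int) : affine_transform b = affine_transform (b % 256) := by
  have h : PySem.List.pyRange 0 8 1 = [0, 1, 2, 3, 4, 5, 6, 7] := by decide
  simp only [affine_transform, h, List.foldl]
  simp only [show PySem.Int.mod ((0:Int)+4) 8 = 4 from by decide,
    show PySem.Int.mod ((0:Int)+5) 8 = 5 from by decide,
    show PySem.Int.mod ((0:Int)+6) 8 = 6 from by decide,
    show PySem.Int.mod ((0:Int)+7) 8 = 7 from by decide,
    show PySem.Int.mod ((1:Int)+4) 8 = 5 from by decide,
    show PySem.Int.mod ((1:Int)+5) 8 = 6 from by decide,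
    show PySem.Int.mod ((1:Int)+6) 8 = 7 from by decide,
    show PySem.Int.mod ((1:Int)+7) 8 = 0 from by decide,
    show PySem.Int.mod ((2:Int)+4) 8 = 6 from by decide,
    show PySem.Int.mod ((2:Int)+5) 8 = 7 from by decide,
    show PySem.Int.mod ((2:Int)+6) 8 = 0 from by decide,
    show PySem.Int.mod ((2:Int)+7) 8 = 1 from by decide,
    show PySem.Int.mod ((3:Int)+4) 8 = 7 from by decide,
    show PySem.Int.mod ((3:Int)+5) 8 = 0 from by decide,
    show PySem.Int.mod ((3:Int)+6) 8 = 1 from by decide,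
    show PySem.Int.mod ((3:Int)+7) 8 = 2 from by decide,
    show PySem.Int.mod ((4:Int)+4) 8 = 0 from by decide,
    show PySem.Int.mod ((4:Int)+5) 8 = 1 from by decide,
    show PySem.Int.mod ((4:Int)+6) 8 = 2 from by decide,
    show PySem.Int.mod ((4:Int)+7) 8 = 3 from by decide,
    show PySem.Int.mod ((5:Int)+4) 8 = 1 from by decide,
    show PySem.Int.mod ((5:Int)+5) 8 = 2 from by decide,
    show PySem.Int.mod ((5:Int)+6) 8 = 3 from by decide,
    show PySem.Int.mod ((5:Int)+7) 8 = 4 from by decide,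
    show PySem.Int.mod ((6:Int)+4) 8 = 2 from by decide,
    show PySem.Int.mod ((6:Int)+5) 8 = 3 from by decide,
    show PySem.Int.mod ((6:Int)+6) 8 = 4 from by decide,
    show PySem.Int.mod ((6:Int)+7) 8 = 5 from by decide,
    show PySem.Int.mod ((7:Int)+4) 8 = 3 from by decide,
    show PySem.Int.mod ((7:Int)+5) 8 = 4 from by decide,
    show PySem.Int.mod ((7:Int)+6) 8 = 5 from by decide,
    show PySem.Int.mod ((7:Int)+7) 8 = 6 from by decide]
  rw [pv_bandbitI b 0 (by omega) (by omega), pv_bandbitI b 1 (by omega) (by omega), pv_bandbitI b 2 (by omega) (by omega), pv_bandbitI b 3 (by omega) (by omega), pv_bandbitI b 4 (by omega) (by omega), pv_bandbitI b 5 (by omega) (by omega), pv_bandbitI b 6 (by omega) (by omega), pv_bandbitI b 7 (by omega) (by omega)]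

-- B only looks at byte_val % 256
lemma pv_periB (b : Int) : affine_transform_alt b = affine_transform_alt (b % 256) := by
  simp only [affine_transform_alt, PySem.Int.mod, pv_fmod256,
    Int.emod_emod_of_dvd _ (dvd_refl 256)]

-- exhaustive check of the 256 residues
set_option maxRecDepth 10000 in
lemma pv_all256 : ∀ r : Fin 256,
    affine_transform (r.val : Int) = affine_transform_alt (r.val : Int) := by decide

-- ===== VERDICT (by name: the statement is the Claim_ definition above) =====
theorem affine_transform_spec : Claim_equal_affine_transform := by
  intro b _
  unfold Spec_affine_transform
  have h0 : 0 ≤ b % 256 := Int.emod_nonneg _ (by norm_num)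
  have h1 : b % 256 < 256 := Int.emod_lt_of_pos _ (by norm_num)
  have hr := pv_all256 ⟨(b % 256).toNat, by omega⟩
  simp only [Int.toNat_of_nonneg h0] at hr
  rw [pv_periA, pv_periB, hr]
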